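-- pv_equiv track=rewrite | github.com/MrBrantCode/unitest_baseline | mut_generate/mist_train_taco/taco_15538/solution.py | is_lucky_number
-- ===== SOURCE A (Python) =====
-- def is_lucky_number(N: str) -> str:
--     # Check if all characters in the number are valid lucky digits (0, 1, 8)
--     for char in N:
--         if char not in '018':
--             return "NO"
--
--     # Check if the number is the same as its reverse
--     if N == N[::-1]:
--         return "YES"
--     else:
--         return "NO"
-- ===== SOURCE B (Python) =====
-- def is_lucky_number(N: str) -> str:
--     # Fused single scan: compare the two ends (and validate the digit) then shrink.
--     s = N
--     while s:
--         if s[0] != s[-1] or s[0] not in '018':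
--             return "NO"
--         s = s[1:-1]
--     return "YES"
-- ===== Notes on version B (the rewrite author's own statement) =====
-- stated objective: alternative
-- what changed: A's separate digit-validation pass plus reversed-copy comparison is replaced by one outside-in loop that checks end characters for equality and validity together, shrinking the string each step.
import Mathlib
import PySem

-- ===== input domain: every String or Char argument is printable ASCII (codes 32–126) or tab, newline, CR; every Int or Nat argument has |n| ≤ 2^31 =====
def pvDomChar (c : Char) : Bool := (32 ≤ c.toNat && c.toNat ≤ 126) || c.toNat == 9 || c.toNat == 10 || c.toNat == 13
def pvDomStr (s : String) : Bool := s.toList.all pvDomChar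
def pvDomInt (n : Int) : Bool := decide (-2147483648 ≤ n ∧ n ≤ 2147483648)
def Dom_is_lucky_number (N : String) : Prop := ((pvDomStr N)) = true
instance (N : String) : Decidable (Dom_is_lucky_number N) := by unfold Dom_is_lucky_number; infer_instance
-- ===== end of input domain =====

-- B fuses A's two passes (digit validation, then reversed-copy comparison) into one
-- outside-in shrinking loop; the return values are proved equal for all strings.


-- ===== PORT A =====
-- A's for-loop with early return: 'some "NO"' = returned early, 'none' = loop finished
def isLuckyLoopA : List Char → Option String
  | [] => none
  | c :: cs =>
    -- 'char not in "018"': char has length 1, so the substring test = membership among '0','1','8'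
    if !(c == '0' || c == '1' || c == '8') then some "NO" else isLuckyLoopA cs

def is_lucky_number (N : String) : String :=
  match isLuckyLoopA N.toList with
  | some r => r
  | none =>
    -- N == N[::-1]
    if N.toList = ((PySem.List.slice? N.toList none none (-1)).getD []) then "YES" else "NO"

-- ===== PORT B =====
-- Source B's while loop: while s is nonempty compare s[0] with s[-1], validate s[0], shrink to s[1:-1]
def isLuckyLoopB (s : List Char) : String :=
  if hn : s = [] then "YES"
  else
    let c0 := (PySem.List.pyGet? s 0).getD ' '
    let cl := (PySem.List.pyGet? s (-1)).getD ' '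
    if c0 != cl || !(c0 == '0' || c0 == '1' || c0 == '8') then "NO"
    else isLuckyLoopB (PySem.List.slice s (some 1) (some (-1)))
termination_by s.length
decreasing_by
  have h := PySem.List.length_slice s (1 : Int) (-1)
  rw [PySem.List.clampIdx_neg_one] at h
  have hp : 0 < s.length := List.length_pos_iff.mpr hn
  omega

def is_lucky_number_alt (N : String) : String := isLuckyLoopB N.toList

-- ===== PRECONDITION & SPEC =====
def Spec_is_lucky_number (N : String) (out : String) : Prop := out = is_lucky_number_alt N
instance (N : String) (out : String) : Decidable (Spec_is_lucky_number N out) := by unfold Spec_is_lucky_number; infer_instance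

-- ===== CLAIM (what is proved, stated in full; the proofs are below) =====
def Claim_equal_is_lucky_number : Prop := ∀ (N : String), Dom_is_lucky_number N → Spec_is_lucky_number N (is_lucky_number N)

-- ===== LEMMAS AND PROOFS =====

-- common characterisation of both programs: "YES" iff all digits lucky and the list is a palindrome
def luckyTarget (s : List Char) : String :=
  if s.all (fun c => c == '0' || c == '1' || c == '8') ∧ s = s.reverse then "YES" else "NO"

lemma loopA_eq (s : List Char) :
    isLuckyLoopA s = if s.all (fun c => c == '0' || c == '1' || c == '8') then none else some "NO" := by
  induction s with
  | nil => simp [isLuckyLoopA]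
  | cons c cs ih =>
    by_cases h : (c == '0' || c == '1' || c == '8') = true <;>
      simp [isLuckyLoopA, h, ih]

lemma portA_eq (N : String) : is_lucky_number N = luckyTarget N.toList := by
  unfold is_lucky_number luckyTarget
  rw [loopA_eq]
  by_cases h : (N.toList.all (fun c => c == '0' || c == '1' || c == '8')) = true <;>
    simp [h, PySem.List.slice?_none_none_neg_one]

lemma slice_one_neg_one (a b : Char) (m : List Char) :
    PySem.List.slice (a :: (m ++ [b])) (some 1) (some (-1)) = m := by
  have h : ¬((m.length : Int) + 1 < 0) := by omega
  simp [PySem.List.slice, PySem.List.clampIdx, h, List.take_left']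

lemma slice_single (c : Char) :
    PySem.List.slice [c] (some 1) (some (-1)) = ([] : List Char) := by
  simp [PySem.List.slice, PySem.List.clampIdx]

lemma target_step (c b : Char) (m : List Char) :
    luckyTarget (c :: (m ++ [b])) =
      if (c != b || !(c == '0' || c == '1' || c == '8')) then "NO" else luckyTarget m := by
  unfold luckyTarget
  by_cases hcb : c = b
  · subst hcb
    by_cases hl : (c == '0' || c == '1' || c == '8') = true
    · simp [hl]
    · simp [hl]
  · have hno : ¬((c :: (m ++ [b])) = (c :: (m ++ [b])).reverse) := by
      intro h
      have h2 := congrArg List.head? h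
      simp at h2
      exact hcb h2
    simp [hcb]

lemma loopB_eq (n : Nat) : ∀ s : List Char, s.length ≤ n → isLuckyLoopB s = luckyTarget s := by
  induction n with
  | zero =>
    intro s hs
    have : s = [] := List.length_eq_zero_iff.mp (Nat.le_zero.mp hs)
    subst this
    rw [isLuckyLoopB]
    simp [luckyTarget]
  | succ n ih =>
    intro s hs
    match s with
    | [] => rw [isLuckyLoopB]; simp [luckyTarget]
    | c :: t =>
      rcases List.eq_nil_or_concat t with rfl | ⟨m, b, rfl⟩
      · -- singleton
        rw [isLuckyLoopB]
        rw [show isLuckyLoopB (PySem.List.slice [c] (some 1) (some (-1))) = "YES" by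
          rw [slice_single, isLuckyLoopB]; simp]
        by_cases hl : (c == '0' || c == '1' || c == '8') = true <;>
          simp [hl, luckyTarget, PySem.List.pyGet?_neg_one]
      · -- c :: (m ++ [b]), length ≥ 2
        simp only [List.concat_eq_append] at hs ⊢
        rw [isLuckyLoopB]
        have hget0 : (PySem.List.pyGet? (c :: (m ++ [b])) 0).getD ' ' = c := by
          simp [PySem.List.pyGet?_zero_cons]
        have hgetl : (PySem.List.pyGet? (c :: (m ++ [b])) (-1)).getD ' ' = b := by
          have hsplit : (c :: (m ++ [b])) = (c :: m) ++ [b] := by simp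
          rw [hsplit, PySem.List.pyGet?_neg_one_append_singleton]
          rfl
        have ihm : isLuckyLoopB m = luckyTarget m := by
          apply ih
          have : (c :: (m ++ [b])).length = m.length + 2 := by simp
          omega
        simp only [List.cons_ne_nil, dite_false, hget0, hgetl, slice_one_neg_one, ihm,
          target_step]

theorem bLoop_main (s : List Char) : isLuckyLoopB s = luckyTarget s := loopB_eq s.length s le_rfl

-- ===== VERDICT (by name: the statement is the Claim_ definition above) =====
theorem is_lucky_number_spec : Claim_equal_is_lucky_number := by
  intro N _
  unfold Spec_is_lucky_number is_lucky_number_alt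
  rw [portA_eq, bLoop_main]
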